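-- pv_equiv track=rewrite | github.com/ASSERT-KTH/Mokav | experiments/pynguin/c4b/return-lst/generated_tests/src_1049/7/src_1049.py | func
-- ===== SOURCE A (Python) =====
-- def func(*args):
-- 	ret_values = []
--
-- 	s = args[0]
-- 	s1 = [i for i in range(len(s)) if ((s[i] == 'A') or (s[i] == 'E') or (s[i] == 'I') or (s[i] == 'O') or (s[i] == 'U') or (s[i] == 'Y'))]
-- 	d = 0
-- 	for i in range((len(s1) - 1)):
-- 	    if ((s1[(i + 1)] - s1[i]) > d):
-- 	        d = (s1[(i + 1)] - s1[i])
-- 	if ((d == 0) and (len(s1) != 0)):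
-- 	    ret_values.append(max((s1[0] + 1), (len(s) - s1[(- 1)])))
-- 	elif (len(s1) == 0):
-- 	    ret_values.append((len(s) + 1))
-- 	else:
-- 	    d = max(d, (len(s) - s1[(- 1)]), (s1[0] + 1))
-- 	    ret_values.append(d)
--
-- 	return ret_values
-- ===== SOURCE B (Python) =====
-- def func(*args):
-- 	best = run = 0
-- 	for c in args[0]:
-- 		if c in 'AEIOUY':
-- 			run = 0
-- 		else:
-- 			run += 1
-- 			if run > best:
-- 				best = run
-- 	return [best + 1]
-- ===== Notes on version B (the rewrite author's own statement) =====
-- stated objective: simpler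
-- what changed: Instead of building the list of vowel indices and combining a pairwise-gap scan with three boundary cases, B makes one linear pass tracking the longest run of consecutive non-vowels and returns [best+1], which equals A's max gap uniformly.
import Mathlib
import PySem

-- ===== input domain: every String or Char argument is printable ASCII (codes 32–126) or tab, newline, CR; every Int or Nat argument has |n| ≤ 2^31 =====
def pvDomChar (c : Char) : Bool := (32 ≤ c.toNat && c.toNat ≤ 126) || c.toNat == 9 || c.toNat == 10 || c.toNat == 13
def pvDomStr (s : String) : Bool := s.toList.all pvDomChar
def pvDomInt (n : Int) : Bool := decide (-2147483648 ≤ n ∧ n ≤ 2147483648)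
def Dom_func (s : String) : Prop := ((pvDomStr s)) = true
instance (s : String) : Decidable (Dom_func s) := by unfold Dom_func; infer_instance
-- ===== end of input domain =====

-- B replaces A's vowel-index list + pairwise-gap scan + three boundary cases by one pass
-- tracking the longest run of consecutive non-vowels (objective: simpler).

-- ===== PORT A =====
-- s[i] == 'A' or ... or s[i] == 'Y', on the Option returned by indexing (always in range here)
def pvIsVowelA (s : String) (i : Int) : Bool :=
  (PySem.Str.pyGet? s i == some 'A') || (PySem.Str.pyGet? s i == some 'E') ||
  (PySem.Str.pyGet? s i == some 'I') || (PySem.Str.pyGet? s i == some 'O') ||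
  (PySem.Str.pyGet? s i == some 'U') || (PySem.Str.pyGet? s i == some 'Y')

-- body of A's gap loop (s1[i+1] - s1[i] vs d); indices are always in range, default 0
def pvGapStep (s1 : List Int) (d : Int) (i : Int) : Int :=
  if PySem.List.pyGetD s1 (i + 1) 0 - PySem.List.pyGetD s1 i 0 > d then
    PySem.List.pyGetD s1 (i + 1) 0 - PySem.List.pyGetD s1 i 0
  else d

-- A's loop 'for i in range(len(s1) - 1)' updating d
def pvDloop (s1 : List Int) : Int :=
  (PySem.List.pyRange 0 ((s1.length : Int) - 1) 1).foldl (pvGapStep s1) 0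

def func (s : String) : List Int :=
  let n : Int := PySem.Str.len s
  let s1 : List Int := (PySem.List.pyRange 0 n 1).filter (pvIsVowelA s)
  let d : Int := pvDloop s1
  if d = 0 ∧ s1.length ≠ 0 then
    [max (PySem.List.pyGetD s1 0 0 + 1) (n - PySem.List.pyGetD s1 (-1) 0)]
  else if s1.length = 0 then
    [n + 1]
  else
    [max (max d (n - PySem.List.pyGetD s1 (-1) 0)) (PySem.List.pyGetD s1 0 0 + 1)]

-- ===== PORT B =====
-- c in 'AEIOUY'
def pvIsVowelB (c : Char) : Bool := "AEIOUY".toList.contains c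

-- one loop iteration over the state (best, run)
def pvBStep (br : Int × Int) (c : Char) : Int × Int :=
  if pvIsVowelB c then (br.1, 0)
  else (if br.2 + 1 > br.1 then br.2 + 1 else br.1, br.2 + 1)

def func_alt (s : String) : List Int :=
  let p := s.toList.foldl pvBStep (0, 0)
  [p.1 + 1]

-- ===== PRECONDITION & SPEC =====
def Spec_func (s : String) (out : List Int) : Prop := out = func_alt s
instance (s : String) (out : List Int) : Decidable (Spec_func s out) := by unfold Spec_func; infer_instance

-- ===== CLAIM (what is proved, stated in full; the proofs are below) =====
def Claim_equal_func : Prop := ∀ (s : String), Dom_func s → Spec_func s (func s)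

-- ===== LEMMAS AND PROOFS =====

-- the vowel-index list of a character list, in the exact shape A computes it
def pvVidx (cs : List Char) : List Int :=
  (PySem.List.pyRange 0 (cs.length : Int) 1).filter
    (fun i => match PySem.List.pyGet? cs i with
              | some c => pvIsVowelB c
              | none => false)

theorem pvIsVowelA_eq (s : String) (i : Int) :
    pvIsVowelA s i =
      (match PySem.List.pyGet? s.toList i with
       | some c => pvIsVowelB c
       | none => false) := by
  unfold pvIsVowelA
  simp only [PySem.Str.pyGet?_eq, PySem.Chars.pyGet?_eq_listPyGet?]
  cases PySem.List.pyGet? s.toList i with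
  | none => simp
  | some c =>
    unfold pvIsVowelB
    rw [show "AEIOUY".toList = ['A','E','I','O','U','Y'] from rfl, Bool.eq_iff_iff]
    simp
    tauto

theorem pvS1_eq (s : String) :
    (PySem.List.pyRange 0 (PySem.Str.len s) 1).filter (pvIsVowelA s) = pvVidx s.toList := by
  unfold pvVidx
  rw [show PySem.Str.len s = ((s.toList.length : Int)) from by simp]
  exact List.filter_congr (fun i _ => pvIsVowelA_eq s i)

theorem pvVidx_append (cs : List Char) (c : Char) :
    pvVidx (cs ++ [c]) =
      pvVidx cs ++ (if pvIsVowelB c then [(cs.length : Int)] else []) := by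
  unfold pvVidx
  rw [show (((cs ++ [c]).length : Nat) : Int) = (cs.length : Int) + 1 from by simp,
      PySem.List.pyRange_one_succ_right (by positivity)]
  rw [List.filter_append]
  congr 1
  · apply List.filter_congr
    intro i hi
    rw [PySem.List.mem_pyRange_one] at hi
    have h1 := PySem.List.pyGet?_of_nonneg (xs := cs ++ [c]) (i := i) hi.1
    have h2 := PySem.List.pyGet?_of_nonneg (xs := cs) (i := i) hi.1
    have hlt : i.toNat < cs.length := by omega
    rw [h1, h2, List.getElem?_append_left hlt]
  · have hg : PySem.List.pyGet? (cs ++ [c]) (cs.length : Int) = some c := by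
      rw [PySem.List.pyGet?_natCast]
      simp
    simp only [List.filter, hg]
    cases pvIsVowelB c <;> simp

theorem pvVidx_nil : pvVidx [] = [] := by
  simp [pvVidx, PySem.List.pyRange_one_eq_nil]

theorem pvDloop_singleton (m : Int) : pvDloop [m] = 0 := by
  simp [pvDloop, PySem.List.pyRange_one_eq_nil]

theorem pvDloop_append (ys : List Int) (m L : Int) (h : ys.getLast? = some L) :
    pvDloop (ys ++ [m]) = max (pvDloop ys) (m - L) := by
  have hne : ys ≠ [] := by rintro rfl; simp at h
  have hlen : 1 ≤ ys.length := List.length_pos_of_ne_nil hne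
  unfold pvDloop
  have hb : (((ys ++ [m]).length : Nat) : Int) - 1 = ((ys.length : Int) - 1) + 1 := by
    simp
  rw [hb, PySem.List.pyRange_one_succ_right (by omega), List.foldl_append]
  have hpref : (PySem.List.pyRange 0 ((ys.length : Int) - 1) 1).foldl (pvGapStep (ys ++ [m])) 0
      = (PySem.List.pyRange 0 ((ys.length : Int) - 1) 1).foldl (pvGapStep ys) 0 := by
    apply PySem.List.foldl_congr_mem
    intro d i hi
    rw [PySem.List.mem_pyRange_one] at hi
    have e1 : PySem.List.pyGetD (ys ++ [m]) i 0 = PySem.List.pyGetD ys i 0 := by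
      rw [PySem.List.pyGetD_eq_getElem (ys ++ [m]) 0 hi.1 (by simp; omega),
          PySem.List.pyGetD_eq_getElem ys 0 hi.1 (by omega),
          List.getElem_append_left (by omega)]
    have e2 : PySem.List.pyGetD (ys ++ [m]) (i + 1) 0 = PySem.List.pyGetD ys (i + 1) 0 := by
      rw [PySem.List.pyGetD_eq_getElem (ys ++ [m]) 0 (by omega) (by simp; omega),
          PySem.List.pyGetD_eq_getElem ys 0 (by omega) (by omega),
          List.getElem_append_left (by omega)]
    simp [pvGapStep, e1, e2]
  rw [hpref]
  have eL : PySem.List.pyGetD (ys ++ [m]) ((ys.length : Int) - 1 + 1) 0 = m := by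
    rw [show ((ys.length : Int) - 1 + 1) = ((ys.length : Nat) : Int) from by ring]
    rw [PySem.List.pyGetD_natCast]
    simp
  have eLast : PySem.List.pyGetD (ys ++ [m]) ((ys.length : Int) - 1) 0 = L := by
    rw [PySem.List.pyGetD_eq_getElem (ys ++ [m]) 0 (by omega) (by simp),
        List.getElem_append_left (by omega)]
    obtain ⟨h2, hL⟩ := List.getLast?_eq_some_iff.mp h
    subst hL
    simp
  simp only [List.foldl_cons, List.foldl_nil]
  unfold pvGapStep
  rw [eL, eLast]
  split_ifs <;> omega

-- the invariant tying A's quantities to B's fold state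
def pvInv (cs : List Char) : Prop :=
  (pvVidx cs = [] ∧ cs.foldl pvBStep (0, 0) = ((cs.length : Int), (cs.length : Int)))
  ∨ (∃ h L, (pvVidx cs).head? = some h ∧ (pvVidx cs).getLast? = some L ∧ 0 ≤ h ∧
      (cs.foldl pvBStep (0, 0)).2 = (cs.length : Int) - 1 - L ∧
      (cs.foldl pvBStep (0, 0)).1 + 1 =
        max (max (pvDloop (pvVidx cs)) ((cs.length : Int) - L)) (h + 1))

theorem pvInv_holds (cs : List Char) : pvInv cs := by
  induction cs using List.reverseRecOn with
  | nil => exact Or.inl ⟨pvVidx_nil, rfl⟩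
  | append_singleton cs c ih =>
    have hv := pvVidx_append cs c
    have hf : (cs ++ [c]).foldl pvBStep (0, 0) = pvBStep (cs.foldl pvBStep (0, 0)) c :=
      List.foldl_append ..
    rcases ih with ⟨hnil, hB⟩ | ⟨h, L, hh, hL, hh0, hrun, hbest⟩
    · by_cases hc : pvIsVowelB c
      · right
        refine ⟨(cs.length : Int), (cs.length : Int), ?_, ?_, by positivity, ?_, ?_⟩
        · rw [hv, hnil, if_pos hc]; rfl
        · rw [hv, hnil, if_pos hc]; rfl
        · rw [hf, hB]
          simp [pvBStep, hc]
        · rw [hf, hB, hv, hnil, if_pos hc]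
          simp only [List.nil_append, pvDloop_singleton, pvBStep, if_pos hc]
          simp
      · left
        constructor
        · rw [hv, hnil, if_neg hc]; rfl
        · rw [hf, hB]
          simp only [pvBStep, if_neg hc]
          have : ((cs.length : Int)) + 1 > (cs.length : Int) := by omega
          simp only [if_pos this]
          simp
    · have hVne : pvVidx cs ≠ [] := by
        intro he; rw [he] at hh; simp at hh
      by_cases hc : pvIsVowelB c
      · right
        refine ⟨h, (cs.length : Int), ?_, ?_, hh0, ?_, ?_⟩
        · rw [hv, if_pos hc, List.head?_append_of_ne_nil _ hVne]
          exact hh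
        · rw [hv, if_pos hc]
          simp
        · rw [hf]
          simp only [pvBStep, if_pos hc]
          simp
        · rw [hf, hv, if_pos hc, pvDloop_append _ _ _ hL]
          simp only [pvBStep, if_pos hc]
          simp only [List.length_append, List.length_cons, List.length_nil]
          push_cast
          omega
      · right
        refine ⟨h, L, ?_, ?_, hh0, ?_, ?_⟩
        · rw [hv, if_neg hc, List.append_nil]; exact hh
        · rw [hv, if_neg hc, List.append_nil]; exact hL
        · rw [hf]
          simp only [pvBStep, if_neg hc]
          simp only [List.length_append, List.length_cons, List.length_nil]
          push_cast
          omega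
        · rw [hf, hv, if_neg hc, List.append_nil]
          simp only [pvBStep, if_neg hc]
          simp only [List.length_append, List.length_cons, List.length_nil]
          push_cast
          split_ifs <;> omega

theorem pvGetD_zero_eq_head (V : List Int) (h : Int) (hh : V.head? = some h) :
    PySem.List.pyGetD V 0 0 = h := by
  cases V with
  | nil => simp at hh
  | cons x xs =>
    simp at hh
    rw [PySem.List.pyGetD_zero_cons, hh]

theorem pvGetD_neg_one_eq_last (V : List Int) (L : Int) (hL : V.getLast? = some L) :
    PySem.List.pyGetD V (-1) 0 = L := by
  have hne : V ≠ [] := by rintro rfl; simp at hL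
  obtain ⟨zs, hzs⟩ := List.getLast?_eq_some_iff.mp hL
  subst hzs
  rw [PySem.List.pyGetD_neg_one _ 0 hne]
  simp

theorem func_eq (s : String) : func s = func_alt s := by
  simp only [func, func_alt]
  rw [pvS1_eq]
  have hn : PySem.Str.len s = ((s.toList.length : Nat) : Int) := by simp
  rcases pvInv_holds s.toList with ⟨hnil, hB⟩ | ⟨h, L, hh, hL, hh0, hrun, hbest⟩
  · rw [hnil, hB, hn]
    simp [pvDloop, PySem.List.pyRange_one_eq_nil]
  · have hVne : pvVidx s.toList ≠ [] := by
      intro he; rw [he] at hh; simp at hh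
    have hlen : (pvVidx s.toList).length ≠ 0 := by
      simpa [List.length_eq_zero_iff] using hVne
    rw [pvGetD_zero_eq_head _ _ hh, pvGetD_neg_one_eq_last _ _ hL, hn]
    split_ifs with h1
    · congr 1
      have hd0 := h1.1
      omega
    · congr 1
      have hdne : pvDloop (pvVidx s.toList) ≠ 0 := fun he => h1 ⟨he, hlen⟩
      omega

-- ===== VERDICT (by name: the statement is the Claim_ definition above) =====
theorem func_spec : Claim_equal_func := by
  intro s _
  unfold Spec_func
  exact func_eq s
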